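-- pv_equiv track=rewrite | github.com/sutthiphanKeang/204111 | 204111 TA/lab06/เกรดเดอแล้ว/Lab06_5_630510647.py | longest_digit_run
-- ===== SOURCE A (Python) =====
-- def longest_digit_run(n):
--     sum_ = 1
--     num_ = 1
--     while n // 10 != 0:
--         num_1 = n % 10
--         n = n // 10
--         if num_1 == (n % 10):
--             sum_ += 1
--
--         elif num_1 != (n % 10):
--              sum_ = 1
--
--         if sum_ > num_:
--             num_ = sum_
--         elif sum_ < num_:
--             num_ = num_
--
--
--     return num_
-- ===== SOURCE B (Python) =====
-- def longest_digit_run(n):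
--     # Pass 1: collect the digits of n (least-significant first) with the
--     # same arithmetic loop shape as the original (diverges on negative n).
--     digits = []
--     while n // 10 != 0:
--         digits.append(n % 10)
--         n = n // 10
--     digits.append(n % 10)
--     # Pass 2: longest run of equal adjacent digits.
--     best = run = 1
--     for prev, cur in zip(digits, digits[1:]):
--         run = run + 1 if cur == prev else 1
--         if run > best:
--             best = run
--     return best
-- ===== Notes on version B (the rewrite author's own statement) =====
-- stated objective: simpler
-- what changed: A fuses digit extraction with run counting in one stateful loop; B first builds the digit list with the arithmetic loop and then computes the longest run of equal adjacent digits in a separate linear scan over adjacent pairs.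
import Mathlib
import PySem

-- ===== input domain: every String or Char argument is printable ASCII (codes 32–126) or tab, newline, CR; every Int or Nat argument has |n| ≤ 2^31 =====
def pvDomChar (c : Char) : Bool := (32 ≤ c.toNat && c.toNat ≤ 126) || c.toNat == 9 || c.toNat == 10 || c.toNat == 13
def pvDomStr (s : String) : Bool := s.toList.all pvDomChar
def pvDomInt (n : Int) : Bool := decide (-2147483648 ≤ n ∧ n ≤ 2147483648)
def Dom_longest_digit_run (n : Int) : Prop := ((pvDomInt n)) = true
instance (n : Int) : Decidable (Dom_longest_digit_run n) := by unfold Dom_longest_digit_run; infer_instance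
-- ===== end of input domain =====

-- B replaces A's fused digit/counter loop by a build-digit-list pass followed by a
-- separate adjacent-pair scan (objective: simpler decomposition, same cost).


-- ===== PORT A =====
-- A's while-loop, fuel makes it total; fuel n.toNat+1 suffices for every n ≥ 0
-- (Python loops forever on n < 0, excluded by Pre_).
def pvLoopA : Nat → Int → Int → Int → Int
  | 0, _, _, num_ => num_
  | fuel+1, n, sum_, num_ =>
    if PySem.Int.floordiv n 10 ≠ 0 then
      let num_1 := PySem.Int.mod n 10
      let n' := PySem.Int.floordiv n 10
      let sum_' := if num_1 = PySem.Int.mod n' 10 then sum_ + 1 else 1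
      let num_' := if sum_' > num_ then sum_' else num_
      pvLoopA fuel n' sum_' num_'
    else num_

def longest_digit_run (n : Int) : Int := pvLoopA (n.toNat + 1) n 1 1

-- ===== PORT B =====
-- B pass 1: the same arithmetic loop, but only collecting digits (fuel as above).
def pvDigitsB : Nat → Int → List Int → List Int
  | 0, _, digits => digits
  | fuel+1, n, digits =>
    if PySem.Int.floordiv n 10 ≠ 0 then
      pvDigitsB fuel (PySem.Int.floordiv n 10) (digits ++ [PySem.Int.mod n 10])
    else digits ++ [PySem.Int.mod n 10]

-- B pass 2: fold over zip(digits, digits[1:]) with state (run, best).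
def pvStepB (st : Int × Int) (pc : Int × Int) : Int × Int :=
  let run := if pc.2 = pc.1 then st.1 + 1 else 1
  (run, if run > st.2 then run else st.2)

def longest_digit_run_alt (n : Int) : Int :=
  let digits := pvDigitsB (n.toNat + 1) n []
  ((digits.zip (digits.drop 1)).foldl pvStepB (1, 1)).2

-- ===== PRECONDITION & SPEC =====
-- Pre_ excludes n < 0, on which the Python A (and B) loop forever.
def Pre_longest_digit_run (n : Int) : Prop := 0 ≤ n
instance (n : Int) : Decidable (Pre_longest_digit_run n) := by unfold Pre_longest_digit_run; infer_instance
def pvWitness_longest_digit_run : Int := (11233)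
def Spec_longest_digit_run (n : Int) (out : Int) : Prop := out = longest_digit_run_alt n
instance (n : Int) (out : Int) : Decidable (Spec_longest_digit_run n out) := by unfold Spec_longest_digit_run; infer_instance

-- ===== CLAIM (what is proved, stated in full; the proofs are below) =====
def Claim_equal_longest_digit_run : Prop := ∀ (n : Int), Dom_longest_digit_run n → Pre_longest_digit_run n → Spec_longest_digit_run n (longest_digit_run n)

-- ===== LEMMAS AND PROOFS =====

-- the digit accumulator only ever grows on the right
theorem pvDigitsB_acc (fuel : Nat) : ∀ (n : Int) (acc : List Int),
    pvDigitsB fuel n acc = acc ++ pvDigitsB fuel n [] := by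
  induction fuel with
  | zero => intro n acc; simp [pvDigitsB]
  | succ f ih =>
    intro n acc
    by_cases h : PySem.Int.floordiv n 10 ≠ 0
    · simp only [pvDigitsB, if_pos h]
      rw [ih _ (acc ++ [PySem.Int.mod n 10]), ih _ ([] ++ [PySem.Int.mod n 10])]
      simp
    · simp only [pvDigitsB, if_neg h, List.nil_append]

theorem pvDigitsB_head (fuel : Nat) (n : Int) (h : 0 < fuel) :
    ∃ t, pvDigitsB fuel n [] = PySem.Int.mod n 10 :: t := by
  cases fuel with
  | zero => omega
  | succ f =>
    by_cases hc : PySem.Int.floordiv n 10 ≠ 0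
    · simp only [pvDigitsB, if_pos hc]
      rw [pvDigitsB_acc]
      exact ⟨_, rfl⟩
    · exact ⟨[], by simp only [pvDigitsB, if_neg hc, List.nil_append]⟩

theorem pv_floordiv_lt (n : Int) (hn : 0 ≤ n) (h : PySem.Int.floordiv n 10 ≠ 0) :
    0 ≤ PySem.Int.floordiv n 10 ∧ (PySem.Int.floordiv n 10).toNat < n.toNat := by
  rw [PySem.Int.floordiv_eq_ediv_of_pos (by omega)] at *
  have hq := Int.mul_ediv_add_emod n 10
  have hm0 := Int.emod_nonneg n (by norm_num : (10:Int) ≠ 0)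
  have hml := Int.emod_lt_of_pos n (by norm_num : (0:Int) < 10)
  omega

-- main invariant: A's fused loop equals B's fold over the digit-pair list
theorem pvLoop_eq (fuel : Nat) : ∀ (n s b : Int), 0 ≤ n → n.toNat < fuel →
    pvLoopA fuel n s b =
      (let d := pvDigitsB fuel n []
       ((d.zip (d.drop 1)).foldl pvStepB (s, b)).2) := by
  induction fuel with
  | zero => intro n s b _ h; omega
  | succ f ih =>
    intro n s b hn hf
    by_cases hc : PySem.Int.floordiv n 10 ≠ 0
    · obtain ⟨hn', hlt⟩ := pv_floordiv_lt n hn hc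
      have hf' : (PySem.Int.floordiv n 10).toNat < f := by omega
      obtain ⟨t, ht⟩ := pvDigitsB_head f (PySem.Int.floordiv n 10) (by omega)
      simp only [pvLoopA, if_pos hc, pvDigitsB]
      rw [pvDigitsB_acc, ih _ _ _ hn' hf']
      simp only [ht, List.nil_append, List.cons_append, List.drop, List.zip_cons_cons,
        List.foldl_cons]
      simp [pvStepB, @eq_comm Int (n / 10 % 10)]
    · simp only [pvLoopA, pvDigitsB, if_neg hc, List.nil_append]
      simp

-- ===== VERDICT (by name: the statement is the Claim_ definition above) =====
theorem longest_digit_run_spec : Claim_equal_longest_digit_run := by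
  intro n _ hpre
  show longest_digit_run n = longest_digit_run_alt n
  unfold longest_digit_run longest_digit_run_alt
  exact pvLoop_eq (n.toNat + 1) n 1 1 hpre (by omega)
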